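-- pv_equiv track=rewrite | github.com/Aikaku/watchservice | 코드/mordor_ransap_features.csv.py | compute_ransap_features
-- ===== SOURCE A (Python) =====
-- from collections import Counter, defaultdict
--
-- def compute_ransap_features(events):
--     c = Counter()
--     touched = set()
--     parent_map = defaultdict(str)
--
--     for e in events:
--         eid = int(e.get("EventID", -1))
--
--         # File Write/Create
--         if eid == 11:
--             c["file_write_count"] += 1
--             touched.add(e.get("TargetFilename", ""))
--
--         # File Rename
--         elif eid == 13:
--             c["file_rename_count"] += 1
--             touched.add(e.get("TargetFilename", ""))
--
--         # Registry modification
--         elif eid == 12: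
--             c["registry_mod_count"] += 1
--
--         # Process Create
--         elif eid == 1:
--             c["process_spawn_count"] += 1
--             parent_map[e.get("ProcessId")] = e.get("ParentImage", "")
--
--     feats = {
--         "file_write_count": c["file_write_count"],
--         "file_rename_count": c["file_rename_count"],
--         "registry_mod_count": c["registry_mod_count"],
--         "process_spawn_count": c["process_spawn_count"],
--         "touched_file_count": len(touched),
--     }
--
--     # Shadow copy delete
--     shadow_kw = ["vssadmin", "shadowcopy", "wmic shadowcopy"]
--     feats["shadow_copy_delete"] = 1 if any(kw in str(events).lower() for kw in shadow_kw) else 0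
--
--     # Rapid multi-file access
--     feats["rapid_multi_file_access"] = 1 if (feats["file_write_count"] + feats["file_rename_count"]) > 50 else 0
--
--     # Abnormal parent process
--     normal = ["explorer.exe", "svchost.exe", "services.exe"]
--     feats["abnormal_parent_process"] = 1 if any(p not in normal for p in parent_map.values()) else 0
--
--     return feats
-- ===== SOURCE B (Python) =====
-- def compute_ransap_features(events):
--     # several independent passes instead of one branchy dispatch loop
--     eids = [int(e.get("EventID", -1)) for e in events]
--     fw = sum(1 for x in eids if x == 11)
--     fr = sum(1 for x in eids if x == 13)
--     rm = sum(1 for x in eids if x == 12)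
--     ps = sum(1 for x in eids if x == 1)
--     touched = {e.get("TargetFilename", "") for e, x in zip(events, eids) if x in (11, 13)}
--     parent_map = {e.get("ProcessId"): e.get("ParentImage", "")
--                   for e, x in zip(events, eids) if x == 1}
--     s = str(events).lower()
--     normal = ["explorer.exe", "svchost.exe", "services.exe"]
--     return {
--         "file_write_count": fw,
--         "file_rename_count": fr,
--         "registry_mod_count": rm,
--         "process_spawn_count": ps,
--         "touched_file_count": len(touched),
--         "shadow_copy_delete": 1 if any(kw in s for kw in ["vssadmin", "shadowcopy", "wmic shadowcopy"]) else 0,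
--         "rapid_multi_file_access": 1 if fw + fr > 50 else 0,
--         "abnormal_parent_process": 1 if any(p not in normal for p in parent_map.values()) else 0,
--     }
-- ===== Notes on version B (the rewrite author's own statement) =====
-- stated objective: alternative
-- what changed: Replaces A's single branchy if/elif dispatch loop (one fold carrying a Counter, a set and a parent dict) with independent filtered passes: each count is its own filtered tally over the EventID list, touched files a set comprehension over write/rename events, and the ProcessId->ParentImage map a separate last-write-wins pass over spawn events.
import Mathlib
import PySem

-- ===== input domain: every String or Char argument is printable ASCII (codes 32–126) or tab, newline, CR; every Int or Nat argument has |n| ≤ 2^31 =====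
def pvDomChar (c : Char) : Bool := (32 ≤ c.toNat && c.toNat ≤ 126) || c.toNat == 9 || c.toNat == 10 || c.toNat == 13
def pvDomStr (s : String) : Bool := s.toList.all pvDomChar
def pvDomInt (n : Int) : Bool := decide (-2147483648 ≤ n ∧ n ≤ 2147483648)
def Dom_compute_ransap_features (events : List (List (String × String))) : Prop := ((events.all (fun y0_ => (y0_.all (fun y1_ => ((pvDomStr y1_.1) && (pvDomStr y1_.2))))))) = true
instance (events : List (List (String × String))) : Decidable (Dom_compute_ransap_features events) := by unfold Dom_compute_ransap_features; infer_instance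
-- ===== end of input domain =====

-- B replaces A's single branchy dispatch loop by independent filtered passes (counts, touched set,
-- parent map each computed by its own scan); same cost, different decomposition (objective: alternative).


-- ===== PORT A =====
-- Marshalling helpers shared by both ports: each `e` is a Python dict (duplicate keys collapse,
-- last value wins, first-insertion key order), modelled by PySem.Dict.ofList; and both Pythons
-- contain the identical expressions `int(e.get("EventID", -1))` and `str(events).lower()`.
def evEid (e : List (String × String)) : Int :=
  match (PySem.Dict.ofList e).get? "EventID" with
  | none => -1                                  -- e.get default: int(-1)
  | some s => (PySem.Int.ofStr? s).getD 0       -- int(s); none = ValueError, excluded by Pre_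

def evTF (e : List (String × String)) : String := (PySem.Dict.ofList e).getD "TargetFilename" ""
def evPid (e : List (String × String)) : Option String := (PySem.Dict.ofList e).get? "ProcessId"
def evPim (e : List (String × String)) : String := (PySem.Dict.ofList e).getD "ParentImage" ""

-- str(events): Python repr of a list of dicts of strings — exact on Dom (printable ASCII + tab/newline/CR):
-- repr escapes '\', the chosen quote, '\t', '\n', '\r'; double quotes are used iff the string
-- contains a single quote but no double quote.
def pyEscChar (q : Char) (c : Char) : List Char :=
  if c = '\\' then ['\\', '\\']
  else if c = q then ['\\', q]
  else if c = '\t' then ['\\', 't']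
  else if c = '\n' then ['\\', 'n']
  else if c = '\r' then ['\\', 'r']
  else [c]

def pyReprStr (s : String) : List Char :=
  let cs := s.toList
  let q : Char := if cs.contains '\'' && !(cs.contains '"') then '"' else '\''
  q :: (cs.flatMap (pyEscChar q) ++ [q])

def pyJoinComma : List (List Char) → List Char
  | [] => []
  | [x] => x
  | x :: y :: xs => x ++ [',', ' '] ++ pyJoinComma (y :: xs)

def pyReprEvent (e : List (String × String)) : List Char :=
  '{' :: (pyJoinComma (((PySem.Dict.ofList e).items).map
      (fun kv => pyReprStr kv.1 ++ [':', ' '] ++ pyReprStr kv.2)) ++ ['}'])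

def pyStrEventsLower (events : List (List (String × String))) : List Char :=
  PySem.Chars.lower ('[' :: (pyJoinComma (events.map pyReprEvent) ++ [']']))

-- A's single dispatch loop: state = (Counter, touched set, parent_map)
def stepA (st : PySem.Dict String Int × PySem.Set String × PySem.Dict (Option String) String)
    (e : List (String × String)) :
    PySem.Dict String Int × PySem.Set String × PySem.Dict (Option String) String :=
  let eid := evEid e
  if eid = 11 then (st.1.modify "file_write_count" 0 (· + 1), PySem.Set.add st.2.1 (evTF e), st.2.2)
  else if eid = 13 then (st.1.modify "file_rename_count" 0 (· + 1), PySem.Set.add st.2.1 (evTF e), st.2.2)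
  else if eid = 12 then (st.1.modify "registry_mod_count" 0 (· + 1), st.2.1, st.2.2)
  else if eid = 1 then (st.1.modify "process_spawn_count" 0 (· + 1), st.2.1, (st.2.2).insert (evPid e) (evPim e))
  else st

def compute_ransap_features (events : List (List (String × String))) : List (String × Int) :=
  let st := events.foldl stepA (PySem.Dict.empty, PySem.Set.empty, PySem.Dict.empty)
  let c := st.1
  let fw := c.getD "file_write_count" 0
  let fr := c.getD "file_rename_count" 0
  [("file_write_count", fw),
   ("file_rename_count", fr),
   ("registry_mod_count", c.getD "registry_mod_count" 0),
   ("process_spawn_count", c.getD "process_spawn_count" 0),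
   ("touched_file_count", PySem.Set.len st.2.1),
   ("shadow_copy_delete",
     if ["vssadmin", "shadowcopy", "wmic shadowcopy"].any
        (fun kw => PySem.Chars.isIn kw.toList (pyStrEventsLower events)) then 1 else 0),
   ("rapid_multi_file_access", if fw + fr > 50 then 1 else 0),
   ("abnormal_parent_process",
     if (st.2.2).values.any
        (fun p => !(["explorer.exe", "svchost.exe", "services.exe"].contains p)) then 1 else 0)]

-- ===== PORT B =====
def compute_ransap_features_alt (events : List (List (String × String))) : List (String × Int) :=
  let eids := events.map evEid
  let fw : Int := (eids.countP (fun x => x == 11) : Int)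
  let fr : Int := (eids.countP (fun x => x == 13) : Int)
  let rm : Int := (eids.countP (fun x => x == 12) : Int)
  let ps : Int := (eids.countP (fun x => x == 1) : Int)
  let touched := PySem.Set.ofList
      (((events.zip eids).filter (fun p => p.2 == 11 || p.2 == 13)).map (fun p => evTF p.1))
  let pm := ((events.zip eids).filter (fun p => p.2 == 1)).foldl
      (fun (d : PySem.Dict (Option String) String) p => d.insert (evPid p.1) (evPim p.1))
      PySem.Dict.empty
  let s := pyStrEventsLower events
  [("file_write_count", fw),
   ("file_rename_count", fr),
   ("registry_mod_count", rm),
   ("process_spawn_count", ps),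
   ("touched_file_count", PySem.Set.len touched),
   ("shadow_copy_delete",
     if ["vssadmin", "shadowcopy", "wmic shadowcopy"].any
        (fun kw => PySem.Chars.isIn kw.toList s) then 1 else 0),
   ("rapid_multi_file_access", if fw + fr > 50 then 1 else 0),
   ("abnormal_parent_process",
     if pm.values.any
        (fun p => !(["explorer.exe", "svchost.exe", "services.exe"].contains p)) then 1 else 0)]

-- ===== PRECONDITION & SPEC =====
-- Pre_ excludes exactly the inputs where A raises ValueError: an event whose "EventID" value
-- (dict semantics: last value for the key) is not an int(...)-parsable string.
def Pre_compute_ransap_features (events : List (List (String × String))) : Prop :=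
  (events.all (fun e =>
    match (PySem.Dict.ofList e).get? "EventID" with
    | none => true
    | some s => (PySem.Int.ofStr? s).isSome)) = true
instance (events : List (List (String × String))) : Decidable (Pre_compute_ransap_features events) := by
  unfold Pre_compute_ransap_features; infer_instance

def pvWitness_compute_ransap_features : (List (List (String × String))) :=
  [[("EventID", "11"), ("TargetFilename", "doc.txt")],
   [("EventID", "1"), ("ParentImage", "powershell.exe")]]

def Spec_compute_ransap_features (events : List (List (String × String))) (out : List (String × Int)) : Prop := out = compute_ransap_features_alt events
instance (events : List (List (String × String))) (out : List (String × Int)) : Decidable (Spec_compute_ransap_features events out) := by unfold Spec_compute_ransap_features; infer_instance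

-- ===== CLAIM (what is proved, stated in full; the proofs are below) =====
def Claim_equal_compute_ransap_features : Prop := ∀ (events : List (List (String × String))), Dom_compute_ransap_features events → Pre_compute_ransap_features events → Spec_compute_ransap_features events (compute_ransap_features events)

-- ===== LEMMAS AND PROOFS =====

-- The four counter cells of A's fold are counts of EventIDs.
theorem loopA_cnts (events : List (List (String × String))) :
    ∀ (c : PySem.Dict String Int) (t : PySem.Set String) (p : PySem.Dict (Option String) String),
    ((events.foldl stepA (c, t, p)).1).getD "file_write_count" 0
      = c.getD "file_write_count" 0 + (events.countP (fun e => evEid e == 11) : Int)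
    ∧ ((events.foldl stepA (c, t, p)).1).getD "file_rename_count" 0
      = c.getD "file_rename_count" 0 + (events.countP (fun e => evEid e == 13) : Int)
    ∧ ((events.foldl stepA (c, t, p)).1).getD "registry_mod_count" 0
      = c.getD "registry_mod_count" 0 + (events.countP (fun e => evEid e == 12) : Int)
    ∧ ((events.foldl stepA (c, t, p)).1).getD "process_spawn_count" 0
      = c.getD "process_spawn_count" 0 + (events.countP (fun e => evEid e == 1) : Int) := by
  induction events with
  | nil => intro c t p; simp
  | cons e rest ih =>
    intro c t p
    simp only [List.foldl_cons, List.countP_cons, stepA]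
    by_cases h11 : evEid e = 11
    · obtain ⟨i1, i2, i3, i4⟩ := ih (c.modify "file_write_count" 0 (· + 1)) (PySem.Set.add t (evTF e)) p
      simp [h11, i1, i2, i3, i4, PySem.Dict.getD_modify]; ring
    · by_cases h13 : evEid e = 13
      · obtain ⟨i1, i2, i3, i4⟩ := ih (c.modify "file_rename_count" 0 (· + 1)) (PySem.Set.add t (evTF e)) p
        simp [h13, i1, i2, i3, i4, PySem.Dict.getD_modify]; ring
      · by_cases h12 : evEid e = 12
        · obtain ⟨i1, i2, i3, i4⟩ := ih (c.modify "registry_mod_count" 0 (· + 1)) t p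
          simp [h12, i1, i2, i3, i4, PySem.Dict.getD_modify]; ring
        · by_cases h1 : evEid e = 1
          · obtain ⟨i1, i2, i3, i4⟩ := ih (c.modify "process_spawn_count" 0 (· + 1)) t ((p).insert (evPid e) (evPim e))
            simp [h1, i1, i2, i3, i4, PySem.Dict.getD_modify]; ring
          · obtain ⟨i1, i2, i3, i4⟩ := ih c t p
            simp [h11, h13, h12, h1, i1, i2, i3, i4]

-- The touched-set of A's fold is the set of TargetFilenames of write/rename events.
theorem loopA_touch (events : List (List (String × String))) :
    ∀ (c : PySem.Dict String Int) (t : PySem.Set String) (p : PySem.Dict (Option String) String),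
    (events.foldl stepA (c, t, p)).2.1
      = PySem.Set.update t ((events.filter (fun e => evEid e == 11 || evEid e == 13)).map evTF) := by
  induction events with
  | nil => intro c t p; simp [PySem.Set.update_nil]
  | cons e rest ih =>
    intro c t p
    simp only [List.foldl_cons, List.filter_cons, stepA]
    by_cases h11 : evEid e = 11
    · simp [h11, ih, PySem.Set.update_cons]
    · by_cases h13 : evEid e = 13
      · simp [h13, ih, PySem.Set.update_cons]
      · by_cases h12 : evEid e = 12
        · simp [h12, ih]
        · by_cases h1 : evEid e = 1
          · simp [h1, ih]
          · simp [h11, h13, h12, h1, ih]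

-- The parent_map of A's fold is an insert-fold over the spawn events.
theorem loopA_pm (events : List (List (String × String))) :
    ∀ (c : PySem.Dict String Int) (t : PySem.Set String) (p : PySem.Dict (Option String) String),
    (events.foldl stepA (c, t, p)).2.2
      = (events.filter (fun e => evEid e == 1)).foldl
          (fun (d : PySem.Dict (Option String) String) e => d.insert (evPid e) (evPim e)) p := by
  induction events with
  | nil => intro c t p; simp
  | cons e rest ih =>
    intro c t p
    simp only [List.foldl_cons, List.filter_cons, stepA]
    by_cases h11 : evEid e = 11
    · simp [h11, ih]
    · by_cases h13 : evEid e = 13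
      · simp [h13, ih]
      · by_cases h12 : evEid e = 12
        · simp [h12, ih]
        · by_cases h1 : evEid e = 1
          · simp [h1, ih]
          · simp [h11, h13, h12, h1, ih]

theorem zip_eids (events : List (List (String × String))) :
    events.zip (events.map evEid) = events.map (fun e => (e, evEid e)) := by
  have h := List.zip_map' (f := id) (g := evEid) (l := events)
  simpa using h

-- ===== VERDICT (by name: the statement is the Claim_ definition above) =====
theorem compute_ransap_features_spec : Claim_equal_compute_ransap_features := by
  intro events _ _
  show compute_ransap_features events = compute_ransap_features_alt events
  obtain ⟨c1, c2, c3, c4⟩ :=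
    loopA_cnts events PySem.Dict.empty PySem.Set.empty PySem.Dict.empty
  have ht := loopA_touch events PySem.Dict.empty PySem.Set.empty PySem.Dict.empty
  have hp := loopA_pm events PySem.Dict.empty PySem.Set.empty PySem.Dict.empty
  simp only [compute_ransap_features, compute_ransap_features_alt, zip_eids,
    List.filter_map, List.map_map, List.countP_map, List.foldl_map,
    c1, c2, c3, c4, ht, hp, PySem.Dict.getD_empty, PySem.Set.update_empty,
    PySem.Set.update_empty]
  simp [Function.comp_def]
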